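-- pv_equiv track=rewrite | github.com/Avadh-Ladani-0/LeetCode_Practice | 2308-divide-array-into-equal-pairs/divide-array-into-equal-pairs.py | divideArray
-- ===== SOURCE A (Python) =====
-- from typing import List
--
-- def divideArray(nums: List[int]) -> bool:
--
--     counter={}
--
--     for i in nums:
--         if i not in counter:
--             counter[i]=1
--         else:
--             if counter[i]==2:
--                 counter[i]=1
--             else:
--                 counter[i]+=1
--
--     for i in counter:
--         if counter[i]%2!=0:
--             return False
--
--     return True
-- ===== SOURCE B (Python) =====
-- def divideArray(nums):
--     s = sorted(nums)
--     while s: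
--         if len(s) == 1 or s[0] != s[1]:
--             return False
--         s = s[2:]
--     return True
-- ===== Notes on version B (the rewrite author's own statement) =====
-- stated objective: alternative
-- what changed: Replaces A's hash-counting (dict of capped parity counts built in one pass, then a second scan over the keys) with sort-then-scan: sort the list and consume it two elements at a time, requiring each adjacent pair to be equal.
import Mathlib
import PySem

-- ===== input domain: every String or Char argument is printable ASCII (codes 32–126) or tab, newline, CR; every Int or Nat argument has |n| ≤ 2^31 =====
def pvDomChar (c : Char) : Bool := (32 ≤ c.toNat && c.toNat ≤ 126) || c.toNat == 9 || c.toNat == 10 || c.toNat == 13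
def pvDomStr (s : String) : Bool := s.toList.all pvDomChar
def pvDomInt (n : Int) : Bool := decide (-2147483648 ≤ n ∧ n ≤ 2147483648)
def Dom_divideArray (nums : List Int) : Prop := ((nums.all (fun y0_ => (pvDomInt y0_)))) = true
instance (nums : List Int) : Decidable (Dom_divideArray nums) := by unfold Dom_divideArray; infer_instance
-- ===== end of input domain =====

-- B sorts the list and consumes it two at a time (each adjacent pair must be equal), instead of A's dict of capped parity counts plus a second key scan (alternative algorithm; return-value equivalence).

-- ===== PORT A =====
-- the first loop: build the counter dict (counts capped to cycle 1,2,1,2,…)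
def pvBuildA (nums : List Int) : PySem.Dict Int Int :=
  nums.foldl (fun d i =>
    if d.contains i = false then d.insert i 1
    else if d.getD i 0 == 2 then d.insert i 1
    else d.insert i (d.getD i 0 + 1)) PySem.Dict.empty

-- the second loop: 'for i in counter: if counter[i]%2!=0: return False' (early return)
def pvCheckA (d : PySem.Dict Int Int) : List Int → Bool
  | [] => true
  | k :: ks => if PySem.Int.mod (d.getD k 0) 2 != 0 then false else pvCheckA d ks

def divideArray (nums : List Int) : Bool :=
  pvCheckA (pvBuildA nums) (pvBuildA nums).keys

-- ===== PORT B =====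
-- the while loop: 'while s: if len(s)==1 or s[0]!=s[1]: return False; s = s[2:]'
def pvPaired : List Int → Bool
  | [] => true
  | [_] => false
  | x :: y :: r => if x != y then false else pvPaired r

def divideArray_alt (nums : List Int) : Bool :=
  pvPaired (PySem.List.sorted nums (fun x => x) false)

-- ===== PRECONDITION & SPEC =====
def Spec_divideArray (nums : List Int) (out : Bool) : Prop := out = divideArray_alt nums
instance (nums : List Int) (out : Bool) : Decidable (Spec_divideArray nums out) := by unfold Spec_divideArray; infer_instance

-- ===== CLAIM (what is proved, stated in full; the proofs are below) =====
def Claim_equal_divideArray : Prop := ∀ (nums : List Int), Dom_divideArray nums → Spec_divideArray nums (divideArray nums)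

-- ===== LEMMAS AND PROOFS =====

-- invariant: A's dict stores 1 for values seen an odd number of times, 2 for an even (positive) number
def pvInvA (d : PySem.Dict Int Int) (p : List Int) : Prop :=
  ∀ k : Int, d.get? k = if p.count k = 0 then none else some (if p.count k % 2 = 1 then 1 else 2)

theorem pvInvA_step (d : PySem.Dict Int Int) (p : List Int) (i : Int) (h : pvInvA d p) :
    pvInvA
      (if d.contains i = false then d.insert i 1
       else if d.getD i 0 == 2 then d.insert i 1
       else d.insert i (d.getD i 0 + 1))
      (p ++ [i]) := by
  have hcnt : ∀ k : Int, (p ++ [i]).count k = p.count k + if k = i then 1 else 0 := by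
    intro k; by_cases hk : k = i
    · subst hk; simp [List.count_append]
    · simp [List.count_append, hk, Ne.symm hk]
  have hci : d.contains i = (d.get? i).isSome := PySem.Dict.contains_eq_isSome_get? d i
  by_cases hz : p.count i = 0
  · -- first occurrence of i: A inserts 1
    have hgi : d.get? i = none := by rw [h i, if_pos hz]
    have : d.contains i = false := by rw [hci, hgi]; rfl
    rw [this]
    simp only [if_true]
    intro k
    rw [PySem.Dict.get?_insert, hcnt k]
    by_cases hk : k = i
    · subst hk; simp [hz]
    · simp [hk, h k]
  · -- i already present with value 1 (odd count) or 2 (even count)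
    rcases Nat.even_or_odd (p.count i) with he | ho
    · -- even, positive: stored value 2, A resets to 1
      have hm : p.count i % 2 = 0 := Nat.even_iff.mp he
      have hgi : d.get? i = some 2 := by rw [h i, if_neg hz, hm]; rfl
      have hc : d.contains i = true := by rw [hci, hgi]; rfl
      have hgd : d.getD i 0 = 2 := by rw [PySem.Dict.getD_eq_get?_getD, hgi]; rfl
      rw [hc, hgd]
      norm_num
      intro k
      rw [PySem.Dict.get?_insert, hcnt k]
      by_cases hk : k = i
      · subst hk; simp; omega
      · simp [hk, h k]
    · -- odd: stored value 1, A increments to 2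
      have hm : p.count i % 2 = 1 := Nat.odd_iff.mp ho
      have hgi : d.get? i = some 1 := by rw [h i, if_neg hz, hm]; rfl
      have hc : d.contains i = true := by rw [hci, hgi]; rfl
      have hgd : d.getD i 0 = 1 := by rw [PySem.Dict.getD_eq_get?_getD, hgi]; rfl
      rw [hc, hgd]
      norm_num
      intro k
      rw [PySem.Dict.get?_insert, hcnt k]
      by_cases hk : k = i
      · subst hk; simp; omega
      · simp [hk, h k]

theorem pvInvA_foldl (nums : List Int) (d : PySem.Dict Int Int) (p : List Int) (h : pvInvA d p) :
    pvInvA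
      (nums.foldl (fun d i =>
        if d.contains i = false then d.insert i 1
        else if d.getD i 0 == 2 then d.insert i 1
        else d.insert i (d.getD i 0 + 1)) d)
      (p ++ nums) := by
  induction nums generalizing d p with
  | nil => simpa using h
  | cons i rest ih =>
    have h2 := ih _ _ (pvInvA_step d p i h)
    rw [List.foldl_cons, List.append_cons]
    exact h2

theorem pvBuildA_get? (nums : List Int) : pvInvA (pvBuildA nums) nums := by
  have h0 : pvInvA PySem.Dict.empty [] := by
    intro k; simp [PySem.Dict.get?_empty]
  have h1 := pvInvA_foldl nums PySem.Dict.empty [] h0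
  rw [List.nil_append] at h1
  exact h1

theorem pvCheckA_iff (d : PySem.Dict Int Int) (ks : List Int) :
    pvCheckA d ks = true ↔ ∀ k ∈ ks, PySem.Int.mod (d.getD k 0) 2 = 0 := by
  induction ks with
  | nil => simp [pvCheckA]
  | cons k ks ih =>
    by_cases h : PySem.Int.mod (d.getD k 0) 2 = 0
    · have hb : (PySem.Int.mod (d.getD k 0) 2 != 0) = false := bne_eq_false_iff_eq.mpr h
      rw [pvCheckA, hb]
      simp only [Bool.false_eq_true, if_false, ih, List.forall_mem_cons]
      exact ⟨fun ha => ⟨h, ha⟩, fun ha => ha.2⟩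
    · have hb : (PySem.Int.mod (d.getD k 0) 2 != 0) = true := bne_iff_ne.mpr h
      rw [pvCheckA, hb]
      simp only [if_true, List.forall_mem_cons]
      exact iff_of_false (by simp) (fun ha => h ha.1)

-- A returns True exactly when every value occurs an even number of times
theorem pvA_iff (nums : List Int) :
    divideArray nums = true ↔ ∀ k ∈ nums, nums.count k % 2 = 0 := by
  have hinv := pvBuildA_get? nums
  rw [divideArray, pvCheckA_iff]
  constructor
  · intro hall k hk
    have hz : nums.count k ≠ 0 := (List.count_pos_iff.mpr hk).ne'
    by_contra hodd
    have hm : nums.count k % 2 = 1 := by omega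
    have hg : (pvBuildA nums).get? k = some 1 := by rw [hinv k, if_neg hz, hm]; simp
    have hkk : k ∈ (pvBuildA nums).keys := by
      by_contra hnk
      rw [(PySem.Dict.get?_eq_none_iff_not_mem_keys _ _).mpr hnk] at hg
      simp at hg
    have := hall k hkk
    rw [PySem.Dict.getD_eq_get?_getD, hg] at this
    exact absurd this (by decide)
  · intro hall k hk
    have hg : ¬ (pvBuildA nums).get? k = none :=
      (not_iff_not.mpr (PySem.Dict.get?_eq_none_iff_not_mem_keys _ _)).mpr (by simp [hk])
    have hz : nums.count k ≠ 0 := by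
      intro hc; rw [hinv k, if_pos hc] at hg; exact hg rfl
    have hmem : k ∈ nums := by rwa [← List.count_pos_iff, Nat.pos_iff_ne_zero]
    have hm : nums.count k % 2 = 0 := hall k hmem
    have hg2 : (pvBuildA nums).get? k = some 2 := by
      rw [hinv k, if_neg hz]
      have : nums.count k % 2 ≠ 1 := by omega
      simp [this]
    rw [PySem.Dict.getD_eq_get?_getD, hg2]
    decide

-- B's pair scan on a sorted list tests the same parity condition
theorem pvPaired_iff : ∀ (s : List Int), s.Pairwise (· ≤ ·) →
    (pvPaired s = true ↔ ∀ k ∈ s, s.count k % 2 = 0)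
  | [], _ => by simp [pvPaired]
  | [x], _ => by
    refine iff_of_false (by simp [pvPaired]) ?_
    intro hall
    have := hall x (List.mem_singleton_self x)
    simp at this
  | x :: y :: r, hs => by
    have ih := pvPaired_iff r
    by_cases hxy : x = y
    · subst hxy
      have hbne : (x != x) = false := by simp
      rw [pvPaired, hbne]
      simp only [Bool.false_eq_true, if_false]
      have hr : r.Pairwise (· ≤ ·) := (List.pairwise_cons.mp (List.pairwise_cons.mp hs).2).2
      rw [ih hr]
      have hcnt : ∀ k : Int, (x :: x :: r).count k = (if k = x then 2 else 0) + r.count k := by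
        intro k; by_cases hk : k = x
        · subst hk; simp; omega
        · simp [hk, Ne.symm hk]
      constructor
      · intro hall k hk
        rw [hcnt k]
        by_cases hk2 : k = x
        · subst hk2
          by_cases hxr : k ∈ r
          · have := hall k hxr; simp; omega
          · simp [List.count_eq_zero.mpr hxr]
        · have hkr : k ∈ r := by simpa [List.mem_cons, hk2] using hk
          have := hall k hkr
          simpa [hk2] using this
      · intro hall k hk
        have h1 := hall k (by simp [hk])
        rw [hcnt k] at h1
        by_cases hk2 : k = x
        · subst hk2; simp at h1; omega
        · simpa [hk2] using h1
    · have hbne : (x != y) = true := bne_iff_ne.mpr hxy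
      rw [pvPaired, hbne]
      simp only [if_true]
      refine iff_of_false (by simp) ?_
      intro hall
      have hx1 : (x :: y :: r).count x = 1 := by
        have hxr : x ∉ r := by
          intro hxr
          have h1 : x ≤ y := (List.pairwise_cons.mp hs).1 y (by simp)
          have h2 : y ≤ x := (List.pairwise_cons.mp (List.pairwise_cons.mp hs).2).1 x hxr
          exact hxy (le_antisymm h1 h2)
        simp [Ne.symm hxy, List.count_eq_zero.mpr hxr]
      have := hall x (by simp)
      rw [hx1] at this
      simp at this

-- ===== VERDICT (by name: the statement is the Claim_ definition above) =====
theorem divideArray_spec : Claim_equal_divideArray := by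
  intro nums _
  show divideArray nums = divideArray_alt nums
  have hperm : (PySem.List.sorted nums (fun x => x) false).Perm nums := PySem.List.sorted_perm nums (fun x => x) false
  have hpw : (PySem.List.sorted nums (fun x => x) false).Pairwise (· ≤ ·) := by
    simpa using PySem.List.sorted_pairwise (xs := nums) (key := fun x => x)
  have hA := pvA_iff nums
  have hB := pvPaired_iff (PySem.List.sorted nums (fun x => x) false) hpw
  have hcount : ∀ k : Int, (PySem.List.sorted nums (fun x => x) false).count k = nums.count k :=
    fun k => hperm.count_eq k
  have hmem : ∀ k : Int, k ∈ (PySem.List.sorted nums (fun x => x) false) ↔ k ∈ nums :=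
    fun k => hperm.mem_iff
  rw [Bool.eq_iff_iff, hA, divideArray_alt, hB]
  constructor
  · intro h k hk; rw [hcount k]; exact h k ((hmem k).mp hk)
  · intro h k hk; exact (hcount k) ▸ h k ((hmem k).mpr hk)
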